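-- pv_equiv track=rewrite | github.com/pozoii/2048 | 2048.py | play_move1
-- ===== SOURCE A (Python) =====
-- def play_move1(move,board,size):#primera parte del movimiento, antes de juntar los números iguales
--     if move=="left":
--         T=[[board[n][m] for n in range(size)] for m in range(size)]#Hemos hecho la transpuesta,ahora será como hacer "up"
--         for i in range(size):
--             for j in range(size-1):
--                 if T[j][i]==0:
--                     l=1
--                     while l<size-1-j and T[j+l][i]==0:
--                         l+=1
--                     T[j][i]=T[j+l][i]
--                     T[j+l][i]=0
--         board=[[T[j][i] for j in range(size)] for i in range(size)]#volvemos a transponer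
--
--
--
--
--     elif move=="right":
--         T=[[board[j][i] for j in range(size)] for i in range(size)]
--         for i in range(size):
--             for j in range(size-1):
--                 if T[size-1-j][i]==0:
--                     l=1
--                     while l<size-1-j and T[size-1-j-l][i]==0:
--                         l+=1
--                     T[size-1-j][i]=T[size-j-1-l][i]
--                     T[size-j-1-l][i]=0
--         board=[[T[j][i] for j in range(size)] for i in range(size)]
--
--
--
--     elif move=="down":
--         for i in range(size):#fijamos columna
--             for j in range(size-1):#fijamos fila
--                 if board[size-1-j][i]==0:#miramos de la casilla más alta a la más baja
--                     l=1
--                     while l<size-1-j and board[size-1-j-l][i]==0:#encontramos la primera casilla distinta de 0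
--                         l+=1
--                     board[size-1-j][i]=board[size-j-1-l][i]
--                     board[size-j-1-l][i]=0
--
--
--
--
--
--     elif move=="up":
--         for i in range(size):
--             for j in range(size-1):
--                 if board[j][i]==0:
--                     l=1
--                     while l<size-1-j and board[j+l][i]==0:
--                         l+=1
--                     board[j][i]=board[j+l][i]
--                     board[j+l][i]=0
--
--     return(board)
-- ===== SOURCE B (Python) =====
-- def play_move1(move, board, size):
--     # NOTE: like the original, this mutates `board` rows in place for "up"/"down".
--     def packed(line, front):
--         nz = [x for x in line if x != 0]
--         pad = [0] * (len(line) - len(nz))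
--         return nz + pad if front else pad + nz
--     if move == "left":
--         board = [packed(board[i][:size], True) for i in range(size)]
--     elif move == "right":
--         board = [packed(board[i][:size], False) for i in range(size)]
--     elif move == "up" or move == "down":
--         for c in range(size):
--             col = packed([board[r][c] for r in range(size)], move == "up")
--             for r in range(size):
--                 board[r][c] = col[r]
--     return board
-- ===== Notes on version B (the rewrite author's own statement) =====
-- stated objective: alternative
-- what changed: Replaces the per-cell zero-bubbling (for each cell an inner while-scan for the next nonzero, plus explicit transposes for left/right) by a single collect-nonzeros-and-pad pass per row/column; same measured cost on the generated inputs.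
-- outside the precondition, e.g. on play_move1('up', [[1, 2], [3]], 2): A returns [[1, 2], [3]], B raises IndexError
import Mathlib
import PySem

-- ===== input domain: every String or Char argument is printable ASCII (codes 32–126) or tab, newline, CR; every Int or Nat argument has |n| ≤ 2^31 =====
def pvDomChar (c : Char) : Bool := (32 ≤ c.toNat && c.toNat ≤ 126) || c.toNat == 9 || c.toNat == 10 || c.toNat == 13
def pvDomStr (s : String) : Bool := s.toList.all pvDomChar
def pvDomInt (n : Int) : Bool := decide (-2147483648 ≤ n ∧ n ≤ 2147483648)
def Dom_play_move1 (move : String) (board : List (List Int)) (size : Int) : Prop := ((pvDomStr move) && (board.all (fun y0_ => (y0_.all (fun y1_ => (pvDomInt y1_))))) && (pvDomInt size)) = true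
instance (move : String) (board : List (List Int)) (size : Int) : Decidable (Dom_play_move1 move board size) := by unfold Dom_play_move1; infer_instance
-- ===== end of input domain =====

-- B replaces A's per-cell zero-bubbling (inner while-scan per cell) by one collect-nonzeros-and-pad
-- pass per row/column; like A, the Python B mutates `board`'s rows in place for "up"/"down"
-- (the mutation is identical; the theorems here are about the return value).

-- ===== PORT A =====
-- shared subscript helpers: g2 B j i = B[j][i] (read), s2 B j i v = B[j][i] = v (write)
def g2 (B : List (List Int)) (j i : Int) : Int :=
  PySem.List.pyGetD (PySem.List.pyGetD B j []) i 0

def s2 (B : List (List Int)) (j i : Int) (v : Int) : List (List Int) :=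
  PySem.List.pySetD B j (PySem.List.pySetD (PySem.List.pyGetD B j []) i v)

-- the `while l < size-1-j and T[j+l][i]==0: l+=1` loop (fuel makes it total; fuel = size.toNat suffices)
def findlUp (T : List (List Int)) (i j size l : Int) : Nat → Int
  | 0 => l
  | fuel+1 => if l < size - 1 - j ∧ g2 T (j + l) i = 0 then findlUp T i j size (l+1) fuel else l

def findlDown (T : List (List Int)) (i j size l : Int) : Nat → Int
  | 0 => l
  | fuel+1 => if l < size - 1 - j ∧ g2 T (size - 1 - j - l) i = 0 then findlDown T i j size (l+1) fuel else l

-- the `for j in range(size-1)` body of the "up"-shaped pass, for a fixed column i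
def passUpCol (size : Int) (T : List (List Int)) (i : Int) : List (List Int) :=
  (PySem.List.pyRange 0 (size-1) 1).foldl (fun T j =>
    if g2 T j i = 0 then
      let l := findlUp T i j size 1 size.toNat
      s2 (s2 T j i (g2 T (j + l) i)) (j + l) i 0
    else T) T

def passDownCol (size : Int) (T : List (List Int)) (i : Int) : List (List Int) :=
  (PySem.List.pyRange 0 (size-1) 1).foldl (fun T j =>
    if g2 T (size - 1 - j) i = 0 then
      let l := findlDown T i j size 1 size.toNat
      s2 (s2 T (size - 1 - j) i (g2 T (size - 1 - j - l) i)) (size - 1 - j - l) i 0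
    else T) T

-- [[B[n][m] for n in range(size)] for m in range(size)]
def transposeN (B : List (List Int)) (size : Int) : List (List Int) :=
  (PySem.List.pyRange 0 size 1).map (fun i => (PySem.List.pyRange 0 size 1).map (fun j => g2 B j i))

def play_move1 (move : String) (board : List (List Int)) (size : Int) : List (List Int) :=
  if move = "left" then
    transposeN ((PySem.List.pyRange 0 size 1).foldl (fun T i => passUpCol size T i) (transposeN board size)) size
  else if move = "right" then
    transposeN ((PySem.List.pyRange 0 size 1).foldl (fun T i => passDownCol size T i) (transposeN board size)) size
  else if move = "down" then
    (PySem.List.pyRange 0 size 1).foldl (fun Bd i => passDownCol size Bd i) board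
  else if move = "up" then
    (PySem.List.pyRange 0 size 1).foldl (fun Bd i => passUpCol size Bd i) board
  else board

-- ===== PORT B =====
-- packed(line, front): the nonzero entries in order, zero-padded in front or behind
def packed (line : List Int) (front : Bool) : List Int :=
  let nz := line.filter (fun x => x != 0)
  let pad := List.replicate (line.length - nz.length) (0 : Int)
  if front then nz ++ pad else pad ++ nz

def play_move1_alt (move : String) (board : List (List Int)) (size : Int) : List (List Int) :=
  if move = "left" then
    (PySem.List.pyRange 0 size 1).map (fun i =>
      packed (PySem.List.slice (PySem.List.pyGetD board i []) none (some size)) true)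
  else if move = "right" then
    (PySem.List.pyRange 0 size 1).map (fun i =>
      packed (PySem.List.slice (PySem.List.pyGetD board i []) none (some size)) false)
  else if move = "up" ∨ move = "down" then
    (PySem.List.pyRange 0 size 1).foldl (fun Bd c =>
      let col := packed ((PySem.List.pyRange 0 size 1).map (fun r => g2 Bd r c)) (move == "up")
      (PySem.List.pyRange 0 size 1).foldl (fun Bd r => s2 Bd r c (PySem.List.pyGetD col r 0)) Bd) board
  else board

-- ===== PRECONDITION & SPEC =====
-- Pre_ excludes boards whose top-left size×size window is incomplete (fewer than size rows, or a
-- short row among the first size): there A raises IndexError except when the zero pattern happens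
-- to dodge the missing cell, while B's column extraction always raises IndexError.
def Pre_play_move1 (move : String) (board : List (List Int)) (size : Int) : Prop :=
  (move = "left" ∨ move = "right" ∨ move = "up" ∨ move = "down") →
    (size ≤ 0 ∨ (size.toNat ≤ board.length ∧
      ∀ j : Nat, j < size.toNat → size.toNat ≤ (board.getD j []).length))

instance (move : String) (board : List (List Int)) (size : Int) : Decidable (Pre_play_move1 move board size) := by
  unfold Pre_play_move1; infer_instance

def pvWitness_play_move1 : String × List (List Int) × Int := ("up", [[0, 2], [3, 0]], 2)

def Spec_play_move1 (move : String) (board : List (List Int)) (size : Int) (out : List (List Int)) : Prop := out = play_move1_alt move board size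
instance (move : String) (board : List (List Int)) (size : Int) (out : List (List Int)) : Decidable (Spec_play_move1 move board size out) := by unfold Spec_play_move1; infer_instance

-- ===== CLAIM (what is proved, stated in full; the proofs are below) =====
def Claim_equal_play_move1 : Prop := ∀ (move : String) (board : List (List Int)) (size : Int), Dom_play_move1 move board size → Pre_play_move1 move board size → Spec_play_move1 move board size (play_move1 move board size)

-- ===== LEMMAS AND PROOFS =====
-- Int-index cons lemmas
theorem pyGetD_int_cons_succ {α : Type} (x : α) (t : List α) (k : Int) (hk : 0 ≤ k) (d : α) :
    PySem.List.pyGetD (x :: t) (k + 1) d = PySem.List.pyGetD t k d := by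
  obtain ⟨m, rfl⟩ := Int.eq_ofNat_of_zero_le hk
  have : ((m : Int) + 1) = ((m + 1 : Nat) : Int) := by push_cast; ring
  rw [this, PySem.List.pyGetD_natCast, PySem.List.pyGetD_natCast, List.getD_cons_succ]

theorem pySetD_int_cons_succ {α : Type} (x : α) (t : List α) (k : Int) (hk : 0 ≤ k) (v : α) :
    PySem.List.pySetD (x :: t) (k + 1) v = x :: PySem.List.pySetD t k v := by
  obtain ⟨m, rfl⟩ := Int.eq_ofNat_of_zero_le hk
  have : ((m : Int) + 1) = ((m + 1 : Nat) : Int) := by push_cast; ring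
  rw [this, PySem.List.pySetD_natCast, PySem.List.pySetD_natCast, List.set_cons_succ]

theorem pyGetD_int_cons_zero {α : Type} (x : α) (t : List α) (d : α) :
    PySem.List.pyGetD (x :: t) 0 d = x := PySem.List.pyGetD_zero_cons x t d

theorem pySetD_int_cons_zero {α : Type} (x : α) (t : List α) (v : α) :
    PySem.List.pySetD (x :: t) 0 v = v :: t := by
  have h0 : (0:Int) = ((0:Nat):Int) := rfl
  rw [h0, PySem.List.pySetD_natCast]; rfl
-- 1D twin of A's inner while loop, on a single column c (bound = c.length)
def find1 (c : List Int) (j l : Int) : Nat → Int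
  | 0 => l
  | fuel+1 => if l < (c.length : Int) - 1 - j ∧ PySem.List.pyGetD c (j + l) 0 = 0 then find1 c j (l+1) fuel else l

-- 1D twin of A's j-loop body
def stepc (fuel : Nat) (c : List Int) (j : Int) : List Int :=
  if PySem.List.pyGetD c j 0 = 0 then
    let l := find1 c j 1 fuel
    PySem.List.pySetD (PySem.List.pySetD c j (PySem.List.pyGetD c (j + l) 0)) (j + l) 0
  else c

theorem find1_ge (c : List Int) (j : Int) : ∀ (fuel : Nat) (l : Int), l ≤ find1 c j l fuel := by
  intro fuel
  induction fuel with
  | zero => intro l; simp [find1]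
  | succ f ih =>
    intro l
    simp only [find1]
    split
    · exact le_trans (by omega) (ih (l+1))
    · omega

theorem find1_le (c : List Int) (j : Int) : ∀ (fuel : Nat) (l : Int),
    find1 c j l fuel ≤ max l ((c.length : Int) - 1 - j) := by
  intro fuel
  induction fuel with
  | zero => intro l; simp [find1]
  | succ f ih =>
    intro l
    simp only [find1]
    split
    · have := ih (l+1); omega
    · omega

theorem length_stepc (fuel : Nat) (c : List Int) (j : Int) : (stepc fuel c j).length = c.length := by
  unfold stepc
  split
  · simp [PySem.List.length_pySetD]
  · rfl

theorem find1_shift (x : Int) (t : List Int) (j : Int) (hj : 0 ≤ j) :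
    ∀ (fuel : Nat) (l : Int), 1 ≤ l → find1 (x :: t) (j + 1) l fuel = find1 t j l fuel := by
  intro fuel
  induction fuel with
  | zero => intro l _; rfl
  | succ f ih =>
    intro l hl
    simp only [find1]
    have hb : ((x :: t).length : Int) - 1 - (j + 1) = (t.length : Int) - 1 - j := by
      simp; omega
    have hg : PySem.List.pyGetD (x :: t) (j + 1 + l) 0 = PySem.List.pyGetD t (j + l) 0 := by
      have : j + 1 + l = (j + l) + 1 := by ring
      rw [this, pyGetD_int_cons_succ _ _ _ (by omega)]
    rw [hb, hg]
    split
    · exact ih (l+1) (by omega)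
    · rfl

theorem stepc_shift (fuel : Nat) (x : Int) (t : List Int) (j : Int) (hj : 0 ≤ j) :
    stepc fuel (x :: t) (j + 1) = x :: stepc fuel t j := by
  unfold stepc
  rw [pyGetD_int_cons_succ _ _ _ hj, find1_shift x t j hj fuel 1 (by omega)]
  split
  · have hl1 : 1 ≤ find1 t j 1 fuel := find1_ge t j fuel 1
    set l := find1 t j 1 fuel with hl
    have h1 : j + 1 + l = (j + l) + 1 := by ring
    dsimp only
    rw [h1, pyGetD_int_cons_succ _ _ _ (by omega), pySetD_int_cons_succ _ _ _ (by omega),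
        pySetD_int_cons_succ _ _ _ (by omega)]
  · rfl
-- generic "loop touches only indices ≥ 1" shift for foldl over shifted ranges
theorem foldl_shift_cons {α β : Type} (step : List α → Int → List α) (stepT : List β → Int → List β)
    (x : α) (f : List β → List α)
    (h : ∀ (t : List β) (j : Int), 0 ≤ j → step (x :: f t) (j + 1) = x :: f (stepT t j)) :
    ∀ (js : List Int), (∀ j ∈ js, 0 ≤ j) → ∀ (t : List β),
      (js.map (· + 1)).foldl step (x :: f t) = x :: f (js.foldl stepT t) := by
  intro js
  induction js with
  | nil => intro _ t; rfl
  | cons j js ih =>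
    intro hpos t
    simp only [List.map_cons, List.foldl_cons]
    rw [h t j (hpos j (by simp))]
    exact ih (fun k hk => hpos k (by simp [hk])) (stepT t j)

theorem pyRange_succ_shift (b : Int) :
    PySem.List.pyRange 1 (b + 1) 1 = (PySem.List.pyRange 0 b 1).map (· + 1) := by
  rw [PySem.List.pyRange_one, PySem.List.pyRange_one, List.map_map]
  have : b + 1 - 1 = b - 0 := by ring
  rw [this]
  apply List.map_congr_left
  intro k _
  simp; ring

theorem mem_pyRange_nonneg (b j : Int) (h : j ∈ PySem.List.pyRange 0 b 1) : 0 ≤ j ∧ j < b := by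
  rw [PySem.List.mem_pyRange_one] at h; exact h

-- find1 characterizations (at j = 0)
theorem find1_all_zero (c : List Int)
    (hz : ∀ k : Int, 0 < k → k < (c.length : Int) → PySem.List.pyGetD c k 0 = 0) :
    ∀ (fuel : Nat) (l : Int), 1 ≤ l → l ≤ (c.length : Int) - 1 →
      ((c.length : Int) - 1 - l).toNat ≤ fuel → find1 c 0 l fuel = (c.length : Int) - 1 := by
  intro fuel
  induction fuel with
  | zero => intro l h1 h2 h3; simp only [find1]; omega
  | succ f ih =>
    intro l h1 h2 h3
    simp only [find1]
    by_cases hlt : l < (c.length : Int) - 1 - 0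
    · rw [if_pos]
      · exact ih (l+1) (by omega) (by omega) (by omega)
      · exact ⟨hlt, by rw [zero_add]; exact hz l (by omega) (by omega)⟩
    · rw [if_neg (by omega)]; omega

theorem find1_first_nonzero (c : List Int) (m : Int)
    (hm : PySem.List.pyGetD c m 0 ≠ 0) (hmn : m ≤ (c.length : Int) - 1) :
    ∀ (fuel : Nat) (l : Int), 1 ≤ l → l ≤ m →
      (∀ k : Int, l ≤ k → k < m → PySem.List.pyGetD c k 0 = 0) →
      (m - l).toNat ≤ fuel → find1 c 0 l fuel = m := by
  intro fuel
  induction fuel with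
  | zero => intro l h1 h2 _ h4; simp only [find1]; omega
  | succ f ih =>
    intro l h1 h2 hz h4
    simp only [find1]
    by_cases heq : l = m
    · subst heq
      rw [if_neg]
      intro ⟨ha, hb⟩
      rw [zero_add] at hb
      exact hm hb
    · rw [if_pos ⟨by omega, by rw [zero_add]; exact hz l (by omega) (by omega)⟩]
      exact ih (l+1) (by omega) (by omega) (fun k hk1 hk2 => hz k (by omega) hk2) (by omega)
theorem pyGetD_toNat {α : Type} (xs : List α) (i : Int) (d : α) (hi : 0 ≤ i) :
    PySem.List.pyGetD xs i d = xs.getD i.toNat d := by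
  obtain ⟨m, rfl⟩ := Int.eq_ofNat_of_zero_le hi
  rw [PySem.List.pyGetD_natCast]; simp

theorem pySetD_toNat {α : Type} (xs : List α) (i : Int) (v : α) (hi : 0 ≤ i) :
    PySem.List.pySetD xs i v = xs.set i.toNat v := by
  obtain ⟨m, rfl⟩ := Int.eq_ofNat_of_zero_le hi
  rw [PySem.List.pySetD_natCast]; simp

theorem getD_append_lt (zs u : List Int) (i : Nat) (hi : i < zs.length) :
    (zs ++ u).getD i 0 = zs.getD i 0 := by
  rw [List.getD_eq_getElem?_getD, List.getD_eq_getElem?_getD, List.getElem?_append_left hi]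

theorem getD_all_zero (t : List Int) (hz : ∀ y ∈ t, y = 0) (i : Nat) : t.getD i 0 = 0 := by
  rw [List.getD_eq_getElem?_getD]
  cases h : t[i]? with
  | none => rfl
  | some y => exact hz y (List.mem_of_getElem? h)

theorem set_all_zero (t : List Int) (hz : ∀ y ∈ t, y = 0) (k : Nat) : t.set k 0 = t := by
  induction t generalizing k with
  | nil => rfl
  | cons x t ih =>
    cases k with
    | zero => simp [hz x (by simp)]
    | succ k => simp only [List.set_cons_succ]; rw [ih (fun y hy => hz y (by simp [hy])) k]

theorem first_nonzero_decomp (t : List Int) (h : ¬ (∀ y ∈ t, y = 0)) :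
    ∃ zs v rest, t = zs ++ v :: rest ∧ (∀ y ∈ zs, y = 0) ∧ v ≠ 0 := by
  induction t with
  | nil => exact absurd (by simp) h
  | cons x t ih =>
    by_cases hx : x = 0
    · have h2 : ¬ (∀ y ∈ t, y = 0) := fun hall => h (by
        intro y hy
        rcases List.mem_cons.mp hy with h1 | h1
        · rw [h1, hx]
        · exact hall y h1)
      obtain ⟨zs, v, rest, ht, hzs, hv⟩ := ih h2
      exact ⟨x :: zs, v, rest, by rw [ht, hx]; rfl, by
        intro y hy; rcases List.mem_cons.mp hy with h1 | h1
        · rw [h1, hx]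
        · exact hzs y h1, hv⟩
    · exact ⟨[], x, t, rfl, by simp, hx⟩

-- packed facts
theorem length_filter_nz (c : List Int) : (c.filter (fun x => x != 0)).length ≤ c.length :=
  List.length_filter_le _ _

theorem length_packed (c : List Int) (f : Bool) : (packed c f).length = c.length := by
  unfold packed
  have := length_filter_nz c
  cases f <;> simp <;> omega

theorem packed_cons_nonzero (x : Int) (t : List Int) (hx : x ≠ 0) :
    packed (x :: t) true = x :: packed t true := by
  unfold packed
  have := length_filter_nz t
  have hfc : (x :: t).filter (fun x => x != 0) = x :: t.filter (fun x => x != 0) := by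
    rw [List.filter_cons]
    simp [hx]
  rw [hfc]
  simp only [List.length_cons, List.cons_append, if_true]
  have h2 : t.length + 1 - ((t.filter (fun x => x != 0)).length + 1) = t.length - (t.filter (fun x => x != 0)).length := by omega
  rw [h2]

theorem packed_all_zero (t : List Int) (hz : ∀ y ∈ t, y = 0) :
    packed t true = List.replicate t.length (0 : Int) := by
  unfold packed
  have hf : t.filter (fun x => x != 0) = [] := by
    rw [List.filter_eq_nil_iff]
    intro a ha; simpa using hz a ha
  simp [hf]
theorem filter_nz_all_zero (zs : List Int) (hz : ∀ y ∈ zs, y = 0) :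
    zs.filter (fun x => x != 0) = [] := by
  rw [List.filter_eq_nil_iff]
  intro a ha; simpa using hz a ha

theorem packed_pull (zs rest : List Int) (v : Int) (hz : ∀ y ∈ zs, y = 0) (hv : v ≠ 0) :
    packed ((0 : Int) :: (zs ++ v :: rest)) true = v :: packed (zs ++ (0 : Int) :: rest) true := by
  unfold packed
  simp only [if_true]
  have h0 : ((0:Int) != 0) = false := by simp
  have hfl : ((0 : Int) :: (zs ++ v :: rest)).filter (fun x => x != 0) = v :: rest.filter (fun x => x != 0) := by
    simp only [List.filter_cons, h0, List.filter_append, filter_nz_all_zero zs hz]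
    simp [hv]
  have hfr : (zs ++ (0 : Int) :: rest).filter (fun x => x != 0) = rest.filter (fun x => x != 0) := by
    simp only [List.filter_append, filter_nz_all_zero zs hz, List.filter_cons, h0]
    simp
  rw [hfl, hfr]
  simp only [List.length_cons, List.length_append, List.cons_append]
  apply congrArg
  apply congrArg
  congr 1
  have := length_filter_nz rest
  omega

theorem main1 : ∀ (n : Nat) (c : List Int) (fuel : Nat), c.length = n → n ≤ fuel + 2 →
    (PySem.List.pyRange 0 ((n : Int) - 1) 1).foldl (stepc fuel) c = packed c true := by
  intro n
  induction n with
  | zero =>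
    intro c fuel hc _
    rw [List.length_eq_zero_iff] at hc
    subst hc
    rw [PySem.List.pyRange_one_eq_nil (by omega)]
    rfl
  | succ n ih =>
    intro c fuel hc hfuel
    cases c with
    | nil => simp at hc
    | cons x t =>
    have ht : t.length = n := by simpa using hc
    by_cases hn : n = 0
    · subst hn
      rw [List.length_eq_zero_iff] at ht
      subst ht
      rw [show ((1 : Nat) : Int) - 1 = 0 by norm_num, PySem.List.pyRange_one_eq_nil (by omega)]
      by_cases hx : x = 0 <;> simp [packed, hx]
    -- n ≥ 1
    have hn1 : 1 ≤ n := by omega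
    have hsplit : PySem.List.pyRange 0 ((n + 1 : Nat) - 1 : Int) 1
        = 0 :: (PySem.List.pyRange 0 ((n : Int) - 1) 1).map (· + 1) := by
      have h1 : ((n + 1 : Nat) : Int) - 1 = (n : Int) := by push_cast; ring
      rw [h1, PySem.List.pyRange_one_cons (by exact_mod_cast hn1)]
      congr 1
      have h2 : (n : Int) = ((n : Int) - 1) + 1 := by ring
      rw [h2, ← pyRange_succ_shift]
      congr 1
      omega
    rw [hsplit, List.foldl_cons]
    have hpos : ∀ j ∈ PySem.List.pyRange 0 ((n : Int) - 1) 1, 0 ≤ j :=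
      fun j hj => (mem_pyRange_nonneg _ j hj).1
    have hshift : ∀ (y : Int) (t : List Int), ((PySem.List.pyRange 0 ((n : Int) - 1) 1).map (· + 1)).foldl (stepc fuel) (y :: t)
        = y :: (PySem.List.pyRange 0 ((n : Int) - 1) 1).foldl (stepc fuel) t :=
      fun y t => foldl_shift_cons (stepc fuel) (stepc fuel) y id
        (fun t j hj => stepc_shift fuel y t j hj)
        (PySem.List.pyRange 0 ((n : Int) - 1) 1) hpos t
    by_cases hx : x = 0
    · subst hx
      by_cases hz : ∀ y ∈ t, y = 0
      · -- all-zero tail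
        have hzc : ∀ k : Int, 0 < k → k < (((0:Int) :: t).length : Int) → PySem.List.pyGetD ((0:Int) :: t) k 0 = 0 := by
          intro k hk1 hk2
          rw [pyGetD_toNat _ _ _ (by omega)]
          have hk3 : k.toNat = (k.toNat - 1) + 1 := by omega
          rw [hk3, List.getD_cons_succ]
          exact getD_all_zero t hz _
        have hstep : stepc fuel ((0:Int) :: t) 0 = (0:Int) :: t := by
          unfold stepc
          rw [if_pos (pyGetD_int_cons_zero _ _ _)]
          have hl : find1 ((0:Int) :: t) 0 1 fuel = (((0:Int) :: t).length : Int) - 1 := by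
            apply find1_all_zero _ hzc fuel 1 (by omega)
              (by simp only [List.length_cons, ht]; push_cast; omega)
              (by simp only [List.length_cons, ht]; omega)
          dsimp only
          rw [hl]
          have hlen : ((((0:Int) :: t).length : Int) - 1) = ((n : Nat) : Int) := by
            simp only [List.length_cons, ht]; push_cast; ring
          rw [hlen, zero_add]
          have hgd : PySem.List.pyGetD ((0:Int) :: t) ((n : Nat) : Int) 0 = 0 := by
            rw [pyGetD_toNat _ _ _ (by omega)]
            have : ((n:Nat):Int).toNat = (n - 1) + 1 := by omega
            rw [this, List.getD_cons_succ]
            exact getD_all_zero t hz _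
          rw [hgd, pySetD_int_cons_zero]
          have : ((n:Nat):Int) = ((n-1 : Nat) : Int) + 1 := by omega
          rw [this, pySetD_int_cons_succ _ _ _ (by omega), pySetD_toNat _ _ _ (by omega)]
          simp [set_all_zero t hz]
        rw [hstep, hshift, ih t fuel ht (by omega)]
        rw [packed_all_zero t hz, packed_all_zero ((0:Int) :: t) (by
          intro y hy; rcases List.mem_cons.mp hy with h | h; exact h; exact hz y h)]
        simp [ht, List.replicate_succ]
      · -- first nonzero in t
        obtain ⟨zs, v, rest, htd, hzs, hv⟩ := first_nonzero_decomp t hz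
        subst htd
        have hm : (zs.length : Int) + 1 ≤ ((((0:Int) :: (zs ++ v :: rest)).length : Int)) - 1 := by
          simp
        have hgm : PySem.List.pyGetD ((0:Int) :: (zs ++ v :: rest)) ((zs.length : Int) + 1) 0 = v := by
          rw [pyGetD_int_cons_succ _ _ _ (by omega), pyGetD_toNat _ _ _ (by omega)]
          simp
        have hstep : stepc fuel ((0:Int) :: (zs ++ v :: rest)) 0
            = v :: (zs ++ (0:Int) :: rest) := by
          unfold stepc
          rw [if_pos (pyGetD_int_cons_zero _ _ _)]
          have hl : find1 ((0:Int) :: (zs ++ v :: rest)) 0 1 fuel = (zs.length : Int) + 1 := by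
            apply find1_first_nonzero _ _ (by rw [hgm]; exact hv) hm fuel 1 (by omega) (by omega)
            · intro k hk1 hk2
              rw [pyGetD_toNat _ _ _ (by omega)]
              have hk3 : k.toNat = (k.toNat - 1) + 1 := by omega
              rw [hk3, List.getD_cons_succ, getD_append_lt zs _ _ (by omega)]
              exact getD_all_zero zs hzs _
            · have hzl : zs.length + (rest.length + 1) = n := by simpa using ht
              simp only [add_sub_cancel_right]
              omega
          dsimp only
          rw [hl, zero_add, hgm, pySetD_int_cons_zero, pySetD_int_cons_succ _ _ _ (by omega)]
          rw [pySetD_toNat _ _ _ (by omega)]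
          simp
        rw [hstep, hshift, ih _ fuel (by simpa using ht) (by omega)]
        exact (packed_pull zs rest v hzs hv).symm
    · -- head nonzero: step is identity
      have hstep : stepc fuel (x :: t) 0 = x :: t := by
        unfold stepc
        rw [if_neg (by rw [pyGetD_int_cons_zero]; exact hx)]
      rw [hstep, hshift, ih t fuel ht (by omega), packed_cons_nonzero x t hx]
-- ===== 2D machinery =====
def Shape (n : Nat) (Bs : List (List Int)) : Prop :=
  n ≤ Bs.length ∧ ∀ j : Nat, j < n → n ≤ (Bs.getD j []).length

def writeCol (i : Int) : List (List Int) → List Int → List (List Int)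
  | Bs, [] => Bs
  | [], _ :: _ => []
  | row :: Bs, v :: c => PySem.List.pySetD row i v :: writeCol i Bs c

def colTake (Bs : List (List Int)) (i : Int) (sz : Int) : List Int :=
  (PySem.List.pyRange 0 sz 1).map (fun j => g2 Bs j i)

theorem length_writeCol (i : Int) (Bs : List (List Int)) (c : List Int) :
    (writeCol i Bs c).length = Bs.length := by
  induction Bs generalizing c with
  | nil => cases c <;> rfl
  | cons row Bs ih =>
    cases c with
    | nil => rfl
    | cons v c => simp [writeCol, ih]

theorem getD_writeCol_lt (i : Int) (Bs : List (List Int)) (c : List Int) (j : Nat)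
    (hjc : j < c.length) (hjB : j < Bs.length) :
    (writeCol i Bs c).getD j [] = PySem.List.pySetD (Bs.getD j []) i (c.getD j 0) := by
  induction Bs generalizing c j with
  | nil => simp at hjB
  | cons row Bs ih =>
    cases c with
    | nil => simp at hjc
    | cons v c =>
      cases j with
      | zero => rfl
      | succ j =>
        simp only [writeCol, List.getD_cons_succ]
        exact ih c j (by simpa using hjc) (by simpa using hjB)

theorem getD_writeCol_ge (i : Int) (Bs : List (List Int)) (c : List Int) (j : Nat)
    (hjc : c.length ≤ j) :
    (writeCol i Bs c).getD j [] = Bs.getD j [] := by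
  induction Bs generalizing c j with
  | nil => cases c <;> rfl
  | cons row Bs ih =>
    cases c with
    | nil => rfl
    | cons v c =>
      cases j with
      | zero => simp at hjc
      | succ j =>
        simp only [writeCol, List.getD_cons_succ]
        exact ih c j (by simpa using hjc)

theorem rowlen_writeCol (i : Int) (Bs : List (List Int)) (c : List Int) (j : Nat) :
    ((writeCol i Bs c).getD j []).length = (Bs.getD j []).length := by
  by_cases h1 : j < c.length
  · by_cases h2 : j < Bs.length
    · rw [getD_writeCol_lt i Bs c j h1 h2, PySem.List.length_pySetD]
    · have e1 : (writeCol i Bs c).getD j [] = [] := by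
        apply List.getD_eq_default
        rw [length_writeCol]; omega
      have e2 : Bs.getD j [] = [] := by apply List.getD_eq_default; omega
      rw [e1, e2]
  · rw [getD_writeCol_ge i Bs c j (by omega)]

theorem shape_writeCol (n : Nat) (i : Int) (Bs : List (List Int)) (c : List Int)
    (h : Shape n Bs) : Shape n (writeCol i Bs c) := by
  obtain ⟨h1, h2⟩ := h
  refine ⟨by rw [length_writeCol]; exact h1, fun j hj => ?_⟩
  rw [rowlen_writeCol]; exact h2 j hj
theorem getD_set_self' (l : List Int) (n : Nat) (v : Int) (h : n < l.length) :
    (l.set n v).getD n 0 = v := by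
  rw [List.getD_eq_getElem?_getD, List.getElem?_set_self (by omega)]
  rfl

theorem getD_set_ne' (l : List Int) (n m : Nat) (v : Int) (h : m ≠ n) :
    (l.set n v).getD m 0 = l.getD m 0 := by
  rw [List.getD_eq_getElem?_getD, List.getD_eq_getElem?_getD, List.getElem?_set_ne (by omega)]

theorem set_getD_self (l : List Int) (n : Nat) (h : n < l.length) :
    l.set n (l.getD n 0) = l := by
  apply List.ext_getElem (by simp)
  intro i h1 h2
  rw [List.getElem_set]
  split
  · next hni =>
      subst hni
      rw [List.getD_eq_getElem?_getD, List.getElem?_eq_getElem h]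
      rfl
  · rfl

-- g2 / s2 on writeCol
theorem g2_writeCol_same (i j : Int) (Bs : List (List Int)) (c : List Int)
    (hi : 0 ≤ i) (hj : 0 ≤ j) (hjc : j.toNat < c.length) (hjB : j.toNat < Bs.length)
    (hrow : i.toNat < (Bs.getD j.toNat []).length) :
    g2 (writeCol i Bs c) j i = PySem.List.pyGetD c j 0 := by
  unfold g2
  rw [pyGetD_toNat _ _ _ hj, pyGetD_toNat _ _ _ hi, pyGetD_toNat _ _ _ hj,
      getD_writeCol_lt i Bs c j.toNat hjc hjB, pySetD_toNat _ _ _ hi,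
      getD_set_self' _ _ _ hrow]

theorem g2_writeCol_ne (i i' j : Int) (Bs : List (List Int)) (c : List Int)
    (hi : 0 ≤ i) (hi' : 0 ≤ i') (hj : 0 ≤ j) (hne : i' ≠ i) :
    g2 (writeCol i Bs c) j i' = g2 Bs j i' := by
  unfold g2
  rw [pyGetD_toNat _ _ _ hj, pyGetD_toNat _ _ _ hi', pyGetD_toNat _ _ _ hj,
      pyGetD_toNat _ _ _ hi']
  by_cases h1 : j.toNat < c.length
  · by_cases h2 : j.toNat < Bs.length
    · rw [getD_writeCol_lt i Bs c j.toNat h1 h2, pySetD_toNat _ _ _ hi,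
          getD_set_ne' _ _ _ _ (by omega)]
    · have e1 : (writeCol i Bs c).getD j.toNat [] = [] := by
        apply List.getD_eq_default; rw [length_writeCol]; omega
      have e2 : Bs.getD j.toNat [] = [] := by apply List.getD_eq_default; omega
      rw [e1, e2]
  · rw [getD_writeCol_ge i Bs c j.toNat (by omega)]

theorem s2_cons_zero (row : List Int) (Bs : List (List Int)) (i v : Int) :
    s2 (row :: Bs) 0 i v = PySem.List.pySetD row i v :: Bs := by
  unfold s2
  rw [pyGetD_int_cons_zero, pySetD_int_cons_zero]

theorem s2_cons_succ (row : List Int) (Bs : List (List Int)) (k i v : Int) (hk : 0 ≤ k) :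
    s2 (row :: Bs) (k + 1) i v = row :: s2 Bs k i v := by
  unfold s2
  rw [pyGetD_int_cons_succ _ _ _ hk, pySetD_int_cons_succ _ _ _ hk]

theorem s2_writeCol (i j v : Int) (Bs : List (List Int)) (c : List Int)
    (hi : 0 ≤ i) (hj : 0 ≤ j) (hjc : j.toNat < c.length) (hjB : j.toNat < Bs.length) :
    s2 (writeCol i Bs c) j i v = writeCol i Bs (PySem.List.pySetD c j v) := by
  obtain ⟨m, rfl⟩ := Int.eq_ofNat_of_zero_le hj
  simp only [Int.toNat_natCast] at hjc hjB
  induction Bs generalizing c m with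
  | nil => simp at hjB
  | cons row Bs ih =>
    cases c with
    | nil => simp at hjc
    | cons w cs =>
      cases m with
      | zero =>
        simp only [writeCol]
        rw [show ((0:Nat):Int) = 0 from rfl, s2_cons_zero, pySetD_int_cons_zero]
        simp only [writeCol]
        rw [pySetD_toNat _ _ _ hi, pySetD_toNat _ _ _ hi, pySetD_toNat _ _ _ hi,
            List.set_set]
      | succ m =>
        simp only [writeCol]
        have hcast : ((m + 1 : Nat) : Int) = ((m : Nat) : Int) + 1 := by push_cast; ring
        rw [hcast, s2_cons_succ _ _ _ _ _ (by omega), pySetD_int_cons_succ _ _ _ (by omega)]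
        simp only [writeCol]
        rw [ih cs m (by omega) (by simpa using hjc) (by simpa using hjB)]
theorem findlUp_commute (n : Nat) (Bs : List (List Int)) (c : List Int) (i j : Int)
    (hsh : Shape n Bs) (hc : c.length = n) (hi : 0 ≤ i) (hin : i.toNat < n) (hj : 0 ≤ j) :
    ∀ (fuel : Nat) (l : Int), 1 ≤ l →
      findlUp (writeCol i Bs c) i j ((n : Nat) : Int) l fuel = find1 c j l fuel := by
  intro fuel
  have hcc : ((c.length : Nat) : Int) = ((n : Nat) : Int) := by rw [hc]
  induction fuel with
  | zero => intro l _; rfl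
  | succ f ih =>
    intro l hl
    simp only [findlUp, find1, hcc]
    by_cases hb : l < ((n : Nat) : Int) - 1 - j
    · have hg : g2 (writeCol i Bs c) (j + l) i = PySem.List.pyGetD c (j + l) 0 := by
        apply g2_writeCol_same i (j + l) Bs c hi (by omega) (by omega) (by
          have := hsh.1; omega)
        have := hsh.2 (j + l).toNat (by omega)
        omega
      by_cases hz : PySem.List.pyGetD c (j + l) 0 = 0
      · rw [if_pos ⟨hb, by rw [hg]; exact hz⟩, if_pos ⟨hb, hz⟩]
        exact ih (l + 1) (by omega)
      · rw [if_neg (by rintro ⟨_, h2⟩; rw [hg] at h2; exact hz h2),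
            if_neg (by rintro ⟨_, h2⟩; exact hz h2)]
    · rw [if_neg (by rintro ⟨h1, _⟩; exact hb h1), if_neg (by rintro ⟨h1, _⟩; exact hb h1)]

theorem foldl_sim {α β : Type} (f : α → Int → α) (g : β → Int → β) (F : β → α)
    (P : β → Prop) (js : List Int)
    (h : ∀ c j, j ∈ js → P c → f (F c) j = F (g c j) ∧ P (g c j)) :
    ∀ c, P c → js.foldl f (F c) = F (js.foldl g c) := by
  induction js with
  | nil => intro c _; rfl
  | cons j js ih =>
    intro c hP
    simp only [List.foldl_cons]
    obtain ⟨he, hp⟩ := h c j (by simp) hP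
    rw [he]
    exact ih (fun c k hk hP => h c k (by simp [hk]) hP) (g c j) hp

theorem stepUp_commute (n : Nat) (Bs : List (List Int)) (c : List Int) (i j : Int) (fuel : Nat)
    (hsh : Shape n Bs) (hc : c.length = n) (hi : 0 ≤ i) (hin : i.toNat < n)
    (hj : 0 ≤ j) (hjn : j < ((n : Nat) : Int) - 1) :
    (if g2 (writeCol i Bs c) j i = 0 then
       let l := findlUp (writeCol i Bs c) i j ((n : Nat) : Int) 1 fuel
       s2 (s2 (writeCol i Bs c) j i (g2 (writeCol i Bs c) (j + l) i)) (j + l) i 0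
     else writeCol i Bs c)
    = writeCol i Bs (stepc fuel c j) := by
  have hrow : ∀ k : Nat, k < n → i.toNat < (Bs.getD k []).length := by
    intro k hk
    have := hsh.2 k hk; omega
  have hBlen := hsh.1
  have hgj : g2 (writeCol i Bs c) j i = PySem.List.pyGetD c j 0 :=
    g2_writeCol_same i j Bs c hi hj (by omega) (by omega) (hrow j.toNat (by omega))
  unfold stepc
  by_cases hz : PySem.List.pyGetD c j 0 = 0
  · rw [if_pos (by rw [hgj]; exact hz), if_pos hz]
    have hfl := findlUp_commute n Bs c i j hsh hc hi hin hj fuel 1 (by omega)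
    dsimp only
    rw [hfl]
    set l := find1 c j 1 fuel with hldef
    have hl1 : 1 ≤ l := find1_ge c j fuel 1
    have hl2 : l ≤ max 1 ((c.length : Int) - 1 - j) := find1_le c j fuel 1
    have hl3 : j + l ≤ ((n : Nat) : Int) - 1 := by omega
    have hgjl : g2 (writeCol i Bs c) (j + l) i = PySem.List.pyGetD c (j + l) 0 :=
      g2_writeCol_same i (j + l) Bs c hi (by omega) (by omega) (by omega)
        (hrow (j + l).toNat (by omega))
    rw [hgjl, s2_writeCol i j _ Bs c hi hj (by omega) (by omega),
        s2_writeCol i (j + l) _ Bs _ hi (by omega)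
          (by rw [PySem.List.length_pySetD]; omega) (by omega)]
  · rw [if_neg (by rw [hgj]; exact hz), if_neg hz]
theorem length_colTake (Bs : List (List Int)) (i : Int) (m : Nat) :
    (colTake Bs i ((m : Nat) : Int)).length = m := by
  simp [colTake, PySem.List.length_pyRange_one]

theorem g2_cons_succ (row : List Int) (Bs : List (List Int)) (j i : Int) (hj : 0 ≤ j) :
    g2 (row :: Bs) (j + 1) i = g2 Bs j i := by
  unfold g2
  rw [pyGetD_int_cons_succ _ _ _ hj]

theorem colTake_cons (row : List Int) (Bs : List (List Int)) (i : Int) (m : Nat) :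
    colTake (row :: Bs) i ((m + 1 : Nat) : Int)
      = PySem.List.pyGetD row i 0 :: colTake Bs i ((m : Nat) : Int) := by
  unfold colTake
  have h1 : ((m + 1 : Nat) : Int) = ((m : Nat) : Int) + 1 := by push_cast; ring
  rw [h1, PySem.List.pyRange_one_cons (by omega), List.map_cons]
  congr 1
  · unfold g2; rw [pyGetD_int_cons_zero]
  · have h2 : PySem.List.pyRange (0 + 1) (((m : Nat) : Int) + 1) 1
        = (PySem.List.pyRange 0 ((m : Nat) : Int) 1).map (· + 1) := by
      rw [zero_add]; exact pyRange_succ_shift _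
    rw [h2, List.map_map]
    apply List.map_congr_left
    intro j hj
    exact g2_cons_succ row Bs j i (mem_pyRange_nonneg _ j hj).1

theorem writeCol_colTake_self (i : Int) (hi : 0 ≤ i) :
    ∀ (m : Nat) (Bs : List (List Int)), m ≤ Bs.length →
      (∀ j : Nat, j < m → i.toNat < (Bs.getD j []).length) →
      writeCol i Bs (colTake Bs i ((m : Nat) : Int)) = Bs := by
  intro m
  induction m with
  | zero =>
    intro Bs _ _
    unfold colTake
    rw [show ((0 : Nat) : Int) = 0 from rfl, PySem.List.pyRange_one_eq_nil (by omega), List.map_nil]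
    cases Bs <;> rfl
  | succ m ih =>
    intro Bs hlen hrow
    cases Bs with
    | nil => simp at hlen
    | cons row Bs =>
      rw [colTake_cons]
      show PySem.List.pySetD row i (PySem.List.pyGetD row i 0) :: writeCol i Bs (colTake Bs i ((m : Nat) : Int)) = row :: Bs
      rw [pySetD_toNat _ _ _ hi, pyGetD_toNat _ _ _ hi,
          set_getD_self row i.toNat (by have := hrow 0 (by omega); simpa using this)]
      rw [ih Bs (by simpa using hlen) (fun j hj => by have := hrow (j+1) (by omega); simpa using this)]
theorem passUpCol_char (n : Nat) (Bs : List (List Int)) (i : Int)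
    (hsh : Shape n Bs) (hi : 0 ≤ i) (hin : i.toNat < n) :
    passUpCol ((n : Nat) : Int) Bs i
      = writeCol i Bs (packed (colTake Bs i ((n : Nat) : Int)) true) := by
  unfold passUpCol
  simp only [Int.toNat_natCast]
  have hc0 := length_colTake Bs i n
  conv_lhs => rw [← writeCol_colTake_self i hi n Bs hsh.1
    (fun j hj => by have := hsh.2 j hj; omega)]
  rw [foldl_sim _ (stepc n) (writeCol i Bs) (fun c => c.length = n) _
    (fun c j hj hP => by
      obtain ⟨hj0, hjlt⟩ := PySem.List.mem_pyRange_one.mp hj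
      exact ⟨stepUp_commute n Bs c i j n hsh hP hi hin hj0 (by omega),
             show (stepc n c j).length = n by rw [length_stepc]; exact hP⟩)
    (colTake Bs i ((n : Nat) : Int)) hc0]
  rw [main1 n (colTake Bs i ((n : Nat) : Int)) n hc0 (by omega)]

theorem foldl_writeback (i : Int) :
    ∀ (c : List Int) (Bs : List (List Int)), c.length ≤ Bs.length →
      (PySem.List.pyRange 0 ((c.length : Nat) : Int) 1).foldl
        (fun B r => s2 B r i (PySem.List.pyGetD c r 0)) Bs = writeCol i Bs c := by
  intro c
  induction c with
  | nil =>
    intro Bs _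
    rw [show ((([] : List Int).length : Nat) : Int) = 0 from rfl,
        PySem.List.pyRange_one_eq_nil (by omega), List.foldl_nil]
    cases Bs <;> rfl
  | cons v cs ih =>
    intro Bs hlen
    cases Bs with
    | nil => simp at hlen
    | cons row Bs =>
      have h1 : (((v :: cs).length : Nat) : Int) = ((cs.length : Nat) : Int) + 1 := by
        simp
      rw [h1, PySem.List.pyRange_one_cons (by omega)]
      have h2 : PySem.List.pyRange (0 + 1) (((cs.length : Nat) : Int) + 1) 1
          = (PySem.List.pyRange 0 ((cs.length : Nat) : Int) 1).map (· + 1) := by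
        rw [zero_add]; exact pyRange_succ_shift _
      rw [h2, List.foldl_cons]
      have h3 : s2 (row :: Bs) 0 i (PySem.List.pyGetD (v :: cs) 0 0)
          = PySem.List.pySetD row i v :: Bs := by
        rw [pyGetD_int_cons_zero, s2_cons_zero]
      rw [h3]
      have h4 := foldl_shift_cons
        (fun B r => s2 B r i (PySem.List.pyGetD (v :: cs) r 0))
        (fun B r => s2 B r i (PySem.List.pyGetD cs r 0))
        (PySem.List.pySetD row i v) id
        (fun t j hj => by
          dsimp only [id]
          rw [pyGetD_int_cons_succ _ _ _ hj, s2_cons_succ _ _ _ _ _ hj])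
        (PySem.List.pyRange 0 ((cs.length : Nat) : Int) 1)
        (fun j hj => (mem_pyRange_nonneg _ j hj).1) Bs
      dsimp only [id] at h4
      rw [h4, ih Bs (by simpa using hlen)]
      rfl
theorem pyGetD_rev (c : List Int) (j : Int) (hj : 0 ≤ j) (hjn : j.toNat < c.length) :
    PySem.List.pyGetD c ((c.length : Int) - 1 - j) 0 = PySem.List.pyGetD c.reverse j 0 := by
  rw [pyGetD_toNat _ _ _ (by omega), pyGetD_toNat _ _ _ hj]
  rw [List.getD_eq_getElem c 0 (by omega), List.getD_eq_getElem c.reverse 0 (by simpa using hjn)]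
  rw [List.getElem_reverse]
  congr 1
  omega

theorem pySetD_rev (c : List Int) (j v : Int) (hj : 0 ≤ j) (hjn : j.toNat < c.length) :
    PySem.List.pySetD c ((c.length : Int) - 1 - j) v
      = (PySem.List.pySetD c.reverse j v).reverse := by
  rw [pySetD_toNat _ _ _ (by omega), pySetD_toNat _ _ _ hj]
  apply List.ext_getElem (by simp)
  intro k h1 h2
  have hk : k < c.length := by simpa using h1
  rw [List.getElem_set, List.getElem_reverse, List.getElem_set]
  have e1 : (c.reverse.set j.toNat v).length = c.length := by simp
  simp only [e1]
  by_cases hcase : (↑c.length - 1 - j).toNat = k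
  · rw [if_pos hcase, if_pos (by omega)]
  · rw [if_neg hcase, if_neg (by omega), List.getElem_reverse]
    congr 1
    omega

theorem findlDown_commute (n : Nat) (Bs : List (List Int)) (c : List Int) (i j : Int)
    (hsh : Shape n Bs) (hc : c.length = n) (hi : 0 ≤ i) (hin : i.toNat < n) (hj : 0 ≤ j) :
    ∀ (fuel : Nat) (l : Int), 1 ≤ l →
      findlDown (writeCol i Bs c) i j ((n : Nat) : Int) l fuel = find1 c.reverse j l fuel := by
  intro fuel
  have hcc : ((c.reverse.length : Nat) : Int) = ((n : Nat) : Int) := by simp [hc]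
  induction fuel with
  | zero => intro l _; rfl
  | succ f ih =>
    intro l hl
    simp only [findlDown, find1, hcc]
    by_cases hb : l < ((n : Nat) : Int) - 1 - j
    · have hg : g2 (writeCol i Bs c) (((n : Nat) : Int) - 1 - j - l) i
          = PySem.List.pyGetD c.reverse (j + l) 0 := by
        rw [g2_writeCol_same i _ Bs c hi (by omega) (by omega) (by have := hsh.1; omega)
            (by have := hsh.2 (((n : Nat) : Int) - 1 - j - l).toNat (by omega); omega)]
        rw [show ((n : Nat) : Int) - 1 - j - l = ((c.length : Int)) - 1 - (j + l) by rw [hc]; ring]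
        exact pyGetD_rev c (j + l) (by omega) (by omega)
      by_cases hz : PySem.List.pyGetD c.reverse (j + l) 0 = 0
      · rw [if_pos ⟨hb, by rw [hg]; exact hz⟩, if_pos ⟨hb, hz⟩]
        exact ih (l + 1) (by omega)
      · rw [if_neg (by rintro ⟨_, h2⟩; rw [hg] at h2; exact hz h2),
            if_neg (by rintro ⟨_, h2⟩; exact hz h2)]
    · rw [if_neg (by rintro ⟨h1, _⟩; exact hb h1), if_neg (by rintro ⟨h1, _⟩; exact hb h1)]

theorem stepDown_commute (n : Nat) (Bs : List (List Int)) (c : List Int) (i j : Int) (fuel : Nat)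
    (hsh : Shape n Bs) (hc : c.length = n) (hi : 0 ≤ i) (hin : i.toNat < n)
    (hj : 0 ≤ j) (hjn : j < ((n : Nat) : Int) - 1) :
    (if g2 (writeCol i Bs c) (((n : Nat) : Int) - 1 - j) i = 0 then
       let l := findlDown (writeCol i Bs c) i j ((n : Nat) : Int) 1 fuel
       s2 (s2 (writeCol i Bs c) (((n : Nat) : Int) - 1 - j) i
            (g2 (writeCol i Bs c) (((n : Nat) : Int) - 1 - j - l) i)) (((n : Nat) : Int) - 1 - j - l) i 0
     else writeCol i Bs c)
    = writeCol i Bs ((stepc fuel c.reverse j).reverse) := by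
  have hrow : ∀ k : Nat, k < n → i.toNat < (Bs.getD k []).length := by
    intro k hk; have := hsh.2 k hk; omega
  have hBlen := hsh.1
  have hgj : g2 (writeCol i Bs c) (((n : Nat) : Int) - 1 - j) i
      = PySem.List.pyGetD c.reverse j 0 := by
    rw [g2_writeCol_same i _ Bs c hi (by omega) (by omega) (by omega)
        (hrow _ (by omega))]
    rw [show ((n : Nat) : Int) - 1 - j = ((c.length : Int)) - 1 - j by rw [hc]]
    exact pyGetD_rev c j hj (by omega)
  unfold stepc
  by_cases hz : PySem.List.pyGetD c.reverse j 0 = 0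
  · rw [if_pos (by rw [hgj]; exact hz), if_pos hz]
    have hfl := findlDown_commute n Bs c i j hsh hc hi hin hj fuel 1 (by omega)
    dsimp only
    rw [hfl]
    set l := find1 c.reverse j 1 fuel with hldef
    have hl1 : 1 ≤ l := find1_ge c.reverse j fuel 1
    have hl2 : l ≤ max 1 ((c.reverse.length : Int) - 1 - j) := find1_le c.reverse j fuel 1
    have hcr : c.reverse.length = n := by simp [hc]
    have hl3 : j + l ≤ ((n : Nat) : Int) - 1 := by rw [hcr] at hl2; omega
    have hgjl : g2 (writeCol i Bs c) (((n : Nat) : Int) - 1 - j - l) i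
        = PySem.List.pyGetD c.reverse (j + l) 0 := by
      rw [g2_writeCol_same i _ Bs c hi (by omega) (by omega) (by omega)
          (hrow _ (by omega))]
      rw [show ((n : Nat) : Int) - 1 - j - l = ((c.length : Int)) - 1 - (j + l) by rw [hc]; ring]
      exact pyGetD_rev c (j + l) (by omega) (by omega)
    rw [hgjl]
    rw [s2_writeCol i _ _ Bs c hi (by omega) (by omega) (by omega)]
    have hrev : PySem.List.pySetD c (((n : Nat) : Int) - 1 - j) (PySem.List.pyGetD c.reverse (j + l) 0)
        = (PySem.List.pySetD c.reverse j (PySem.List.pyGetD c.reverse (j + l) 0)).reverse := by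
      rw [show ((n : Nat) : Int) - 1 - j = ((c.length : Int)) - 1 - j by rw [hc]]
      exact pySetD_rev c j _ hj (by omega)
    rw [hrev]
    have hlen1 : (PySem.List.pySetD c.reverse j (PySem.List.pyGetD c.reverse (j + l) 0)).reverse.length = n := by
      rw [List.length_reverse, PySem.List.length_pySetD, List.length_reverse, hc]
    rw [s2_writeCol i _ _ Bs _ hi (by omega) (by rw [hlen1]; omega) (by have := hsh.1; omega)]
    congr 1
    have hidx : ((n : Nat) : Int) - 1 - j - l
        = (((PySem.List.pySetD c.reverse j (PySem.List.pyGetD c.reverse (j + l) 0)).reverse.length : Int)) - 1 - (j + l) := by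
      rw [hlen1]; ring
    rw [hidx, pySetD_rev _ (j + l) 0 (by omega) (by rw [hlen1]; omega), List.reverse_reverse]
  · rw [if_neg (by rw [hgj]; exact hz), if_neg hz, List.reverse_reverse]

theorem foldl_revsteps (fuel : Nat) (js : List Int) :
    ∀ c : List Int, js.foldl (fun c j => (stepc fuel c.reverse j).reverse) c
      = (js.foldl (stepc fuel) c.reverse).reverse := by
  induction js with
  | nil => intro c; simp
  | cons j js ih =>
    intro c
    simp only [List.foldl_cons]
    rw [ih, List.reverse_reverse]

theorem packed_rev (c : List Int) : (packed c.reverse true).reverse = packed c false := by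
  unfold packed
  simp [List.filter_reverse, List.reverse_append, List.reverse_replicate]

theorem passDownCol_char (n : Nat) (Bs : List (List Int)) (i : Int)
    (hsh : Shape n Bs) (hi : 0 ≤ i) (hin : i.toNat < n) :
    passDownCol ((n : Nat) : Int) Bs i
      = writeCol i Bs (packed (colTake Bs i ((n : Nat) : Int)) false) := by
  unfold passDownCol
  simp only [Int.toNat_natCast]
  have hc0 := length_colTake Bs i n
  conv_lhs => rw [← writeCol_colTake_self i hi n Bs hsh.1
    (fun j hj => by have := hsh.2 j hj; omega)]
  rw [foldl_sim _ (fun c j => (stepc n c.reverse j).reverse) (writeCol i Bs)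
    (fun c => c.length = n) _
    (fun c j hj hP => by
      obtain ⟨hj0, hjlt⟩ := PySem.List.mem_pyRange_one.mp hj
      exact ⟨stepDown_commute n Bs c i j n hsh hP hi hin hj0 (by omega),
             show ((stepc n c.reverse j).reverse).length = n by
               rw [List.length_reverse, length_stepc, List.length_reverse]; exact hP⟩)
    (colTake Bs i ((n : Nat) : Int)) hc0]
  rw [foldl_revsteps]
  rw [main1 n (colTake Bs i ((n : Nat) : Int)).reverse n (by simp [hc0]) (by omega)]
  rw [packed_rev]
theorem foldl_congr_inv {α : Type} (P : α → Prop) (f g : α → Int → α) :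
    ∀ (js : List Int), (∀ a j, j ∈ js → P a → f a j = g a j ∧ P (f a j)) →
      ∀ a, P a → js.foldl f a = js.foldl g a := by
  intro js
  induction js with
  | nil => intro _ a _; rfl
  | cons j js ih =>
    intro h a hP
    simp only [List.foldl_cons]
    obtain ⟨he, hp⟩ := h a j (by simp) hP
    rw [← he]
    exact ih (fun a k hk hP => h a k (by simp [hk]) hP) (f a j) hp

theorem stepB_eq (n : Nat) (Bs : List (List Int)) (i : Int) (col : List Int)
    (hcol : col.length = n) (hlen : n ≤ Bs.length) :
    (PySem.List.pyRange 0 ((n : Nat) : Int) 1).foldl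
      (fun B r => s2 B r i (PySem.List.pyGetD col r 0)) Bs = writeCol i Bs col := by
  have h1 : ((n : Nat) : Int) = ((col.length : Nat) : Int) := by rw [hcol]
  rw [h1, foldl_writeback i col Bs (by omega)]

theorem colTake_writeCol_same (n : Nat) (Bs : List (List Int)) (i : Int) (c : List Int)
    (hsh : Shape n Bs) (hi : 0 ≤ i) (hin : i.toNat < n) (hc : c.length = n) :
    colTake (writeCol i Bs c) i ((n : Nat) : Int) = c := by
  unfold colTake
  have h1 : ∀ j ∈ PySem.List.pyRange 0 ((n : Nat) : Int) 1,
      g2 (writeCol i Bs c) j i = PySem.List.pyGetD c j 0 := by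
    intro j hj
    obtain ⟨hj0, hjlt⟩ := PySem.List.mem_pyRange_one.mp hj
    exact g2_writeCol_same i j Bs c hi hj0 (by omega) (by have := hsh.1; omega)
      (by have := hsh.2 j.toNat (by omega); omega)
  rw [List.map_congr_left h1]
  have h2 : ((n : Nat) : Int) = ((c.length : Nat) : Int) := by rw [hc]
  rw [h2]
  exact PySem.List.map_pyGetD_pyRange_zero c 0

theorem colTake_writeCol_ne (Bs : List (List Int)) (i i' : Int) (c : List Int) (sz : Int)
    (hi : 0 ≤ i) (hi' : 0 ≤ i') (hne : i' ≠ i) :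
    colTake (writeCol i Bs c) i' sz = colTake Bs i' sz := by
  unfold colTake
  apply List.map_congr_left
  intro j hj
  exact g2_writeCol_ne i i' j Bs c hi hi' (PySem.List.mem_pyRange_one.mp hj).1 hne

theorem outer_cols (n : Nat) (front : Bool) :
    ∀ (js : List Int) (Bs : List (List Int)),
      (∀ j ∈ js, 0 ≤ j ∧ j.toNat < n) → js.Nodup → Shape n Bs →
      Shape n (js.foldl (fun T j => writeCol j T (packed (colTake T j ((n : Nat) : Int)) front)) Bs)
      ∧ ∀ i : Int, 0 ≤ i → i.toNat < n →
        colTake (js.foldl (fun T j => writeCol j T (packed (colTake T j ((n : Nat) : Int)) front)) Bs) i ((n : Nat) : Int)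
          = if i ∈ js then packed (colTake Bs i ((n : Nat) : Int)) front
            else colTake Bs i ((n : Nat) : Int) := by
  intro js
  induction js with
  | nil =>
    intro Bs _ _ hsh
    exact ⟨hsh, fun i _ _ => by simp⟩
  | cons j js ih =>
    intro Bs hb hnd hsh
    obtain ⟨hj0, hjn⟩ := hb j (by simp)
    have hstep : Shape n (writeCol j Bs (packed (colTake Bs j ((n : Nat) : Int)) front)) :=
      shape_writeCol n j Bs _ hsh
    have hIH := ih (writeCol j Bs (packed (colTake Bs j ((n : Nat) : Int)) front))
      (fun k hk => hb k (by simp [hk])) (List.Nodup.of_cons hnd) hstep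
    refine ⟨hIH.1, fun i hi hin => ?_⟩
    simp only [List.foldl_cons]
    rw [hIH.2 i hi hin]
    have hjmem : j ∉ js := (List.nodup_cons.mp hnd).1
    by_cases hij : i = j
    · subst hij
      rw [if_neg (by exact fun h => hjmem h), if_pos (by simp)]
      rw [colTake_writeCol_same n Bs i _ hsh hi hin
        (by rw [length_packed, length_colTake])]
    · rw [colTake_writeCol_ne Bs j i _ _ hj0 hi hij]
      by_cases hmem : i ∈ js
      · rw [if_pos hmem, if_pos (by simp [hmem])]
      · rw [if_neg hmem, if_neg (by simp [hij, hmem])]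
theorem map_pyGetD_take (n : Nat) :
    ∀ (r : List Int), n ≤ r.length →
      (PySem.List.pyRange 0 ((n : Nat) : Int) 1).map (fun j => PySem.List.pyGetD r j 0)
        = r.take n := by
  induction n with
  | zero =>
    intro r _
    rw [show ((0 : Nat) : Int) = 0 from rfl, PySem.List.pyRange_one_eq_nil (by omega)]
    simp
  | succ n ih =>
    intro r hlen
    cases r with
    | nil => simp at hlen
    | cons x rs =>
      have h1 : ((n + 1 : Nat) : Int) = ((n : Nat) : Int) + 1 := by push_cast; ring
      rw [h1, PySem.List.pyRange_one_cons (by omega), List.map_cons]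
      have h2 : PySem.List.pyRange (0 + 1) (((n : Nat) : Int) + 1) 1
          = (PySem.List.pyRange 0 ((n : Nat) : Int) 1).map (· + 1) := by
        rw [zero_add]; exact pyRange_succ_shift _
      rw [h2, List.map_map]
      have h3 : ((PySem.List.pyRange 0 ((n : Nat) : Int) 1).map
          ((fun j => PySem.List.pyGetD (x :: rs) j 0) ∘ (· + 1)))
          = (PySem.List.pyRange 0 ((n : Nat) : Int) 1).map (fun j => PySem.List.pyGetD rs j 0) := by
        apply List.map_congr_left
        intro j hj
        exact pyGetD_int_cons_succ x rs j (mem_pyRange_nonneg _ j hj).1 0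
      rw [h3, ih rs (by simpa using hlen), pyGetD_int_cons_zero]
      rfl

theorem shape_transposeN (n : Nat) (Bs : List (List Int)) :
    Shape n (transposeN Bs ((n : Nat) : Int)) := by
  constructor
  · simp [transposeN, PySem.List.length_pyRange_one]
  · intro j hj
    unfold transposeN
    rw [List.getD_eq_getElem _ [] (by simp [PySem.List.length_pyRange_one]; omega)]
    rw [List.getElem_map]
    simp [PySem.List.length_pyRange_one]

theorem transposeN_eq_map_colTake (Bs : List (List Int)) (sz : Int) :
    transposeN Bs sz = (PySem.List.pyRange 0 sz 1).map (fun i => colTake Bs i sz) := rfl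

theorem colTake_transposeN (n : Nat) (board : List (List Int)) (i : Int)
    (hi : 0 ≤ i) (hin : i.toNat < n) (_hbl : n ≤ board.length)
    (hrow : n ≤ (board.getD i.toNat []).length) :
    colTake (transposeN board ((n : Nat) : Int)) i ((n : Nat) : Int)
      = (PySem.List.pyGetD board i []).take n := by
  unfold colTake
  have h1 : ∀ j ∈ PySem.List.pyRange 0 ((n : Nat) : Int) 1,
      g2 (transposeN board ((n : Nat) : Int)) j i
        = PySem.List.pyGetD (PySem.List.pyGetD board i []) j 0 := by
    intro j hj
    obtain ⟨hj0, hjlt⟩ := PySem.List.mem_pyRange_one.mp hj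
    unfold g2 transposeN
    rw [PySem.List.pyGetD_map_pyRange_of_nonneg _ _ _ _ hj0 hjlt]
    rw [PySem.List.pyGetD_map_pyRange_of_nonneg _ _ _ _ hi (by omega)]
    rfl
  rw [List.map_congr_left h1]
  exact map_pyGetD_take n _ (by rw [pyGetD_toNat _ _ _ hi]; exact hrow)
theorem foldA_up (n : Nat) (Bs : List (List Int)) (hsh : Shape n Bs) :
    (PySem.List.pyRange 0 ((n : Nat) : Int) 1).foldl
        (fun T i => passUpCol ((n : Nat) : Int) T i) Bs
      = (PySem.List.pyRange 0 ((n : Nat) : Int) 1).foldl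
          (fun T j => writeCol j T (packed (colTake T j ((n : Nat) : Int)) true)) Bs := by
  apply foldl_congr_inv (Shape n) _ _ _ _ Bs hsh
  intro a j hj hP
  obtain ⟨hj0, hjlt⟩ := PySem.List.mem_pyRange_one.mp hj
  have he := passUpCol_char n a j hP hj0 (by omega)
  exact ⟨he, by rw [he]; exact shape_writeCol n j a _ hP⟩

theorem foldA_down (n : Nat) (Bs : List (List Int)) (hsh : Shape n Bs) :
    (PySem.List.pyRange 0 ((n : Nat) : Int) 1).foldl
        (fun T i => passDownCol ((n : Nat) : Int) T i) Bs
      = (PySem.List.pyRange 0 ((n : Nat) : Int) 1).foldl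
          (fun T j => writeCol j T (packed (colTake T j ((n : Nat) : Int)) false)) Bs := by
  apply foldl_congr_inv (Shape n) _ _ _ _ Bs hsh
  intro a j hj hP
  obtain ⟨hj0, hjlt⟩ := PySem.List.mem_pyRange_one.mp hj
  have he := passDownCol_char n a j hP hj0 (by omega)
  exact ⟨he, by rw [he]; exact shape_writeCol n j a _ hP⟩

theorem foldB (n : Nat) (front : Bool) (Bs : List (List Int)) (hsh : Shape n Bs) :
    (PySem.List.pyRange 0 ((n : Nat) : Int) 1).foldl (fun Bd c =>
        (PySem.List.pyRange 0 ((n : Nat) : Int) 1).foldl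
          (fun Bd' r => s2 Bd' r c (PySem.List.pyGetD
            (packed ((PySem.List.pyRange 0 ((n : Nat) : Int) 1).map (fun r => g2 Bd r c)) front) r 0)) Bd) Bs
      = (PySem.List.pyRange 0 ((n : Nat) : Int) 1).foldl
          (fun T j => writeCol j T (packed (colTake T j ((n : Nat) : Int)) front)) Bs := by
  apply foldl_congr_inv (Shape n) _ _ _ _ Bs hsh
  intro a j hj hP
  obtain ⟨hj0, hjlt⟩ := PySem.List.mem_pyRange_one.mp hj
  have he : (PySem.List.pyRange 0 ((n : Nat) : Int) 1).foldl
      (fun Bd' r => s2 Bd' r j (PySem.List.pyGetD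
        (packed ((PySem.List.pyRange 0 ((n : Nat) : Int) 1).map (fun r => g2 a r j)) front) r 0)) a
      = writeCol j a (packed (colTake a j ((n : Nat) : Int)) front) :=
    stepB_eq n a j (packed (colTake a j ((n : Nat) : Int)) front)
      (by rw [length_packed, length_colTake]) hP.1
  exact ⟨he, by rw [he]; exact shape_writeCol n j a _ hP⟩
theorem left_eq (n : Nat) (board : List (List Int)) (hsh : Shape n board) :
    transposeN ((PySem.List.pyRange 0 ((n : Nat) : Int) 1).foldl
        (fun T i => passUpCol ((n : Nat) : Int) T i) (transposeN board ((n : Nat) : Int))) ((n : Nat) : Int)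
      = (PySem.List.pyRange 0 ((n : Nat) : Int) 1).map (fun i =>
          packed (PySem.List.slice (PySem.List.pyGetD board i []) none (some ((n : Nat) : Int))) true) := by
  rw [foldA_up n _ (shape_transposeN n board)]
  obtain ⟨_, hcols⟩ := outer_cols n true (PySem.List.pyRange 0 ((n : Nat) : Int) 1)
    (transposeN board ((n : Nat) : Int))
    (fun j hj => ⟨(PySem.List.mem_pyRange_one.mp hj).1,
      by have := (PySem.List.mem_pyRange_one.mp hj).2; have := (PySem.List.mem_pyRange_one.mp hj).1; omega⟩)
    (PySem.List.nodup_pyRange_one _ _) (shape_transposeN n board)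
  rw [transposeN_eq_map_colTake]
  apply List.map_congr_left
  intro i hi
  obtain ⟨hi0, hilt⟩ := PySem.List.mem_pyRange_one.mp hi
  rw [hcols i hi0 (by omega), if_pos hi]
  rw [colTake_transposeN n board i hi0 (by omega) hsh.1 (hsh.2 i.toNat (by omega))]
  rw [PySem.List.slice_to _ (by omega)]
  simp

theorem right_eq (n : Nat) (board : List (List Int)) (hsh : Shape n board) :
    transposeN ((PySem.List.pyRange 0 ((n : Nat) : Int) 1).foldl
        (fun T i => passDownCol ((n : Nat) : Int) T i) (transposeN board ((n : Nat) : Int))) ((n : Nat) : Int)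
      = (PySem.List.pyRange 0 ((n : Nat) : Int) 1).map (fun i =>
          packed (PySem.List.slice (PySem.List.pyGetD board i []) none (some ((n : Nat) : Int))) false) := by
  rw [foldA_down n _ (shape_transposeN n board)]
  obtain ⟨_, hcols⟩ := outer_cols n false (PySem.List.pyRange 0 ((n : Nat) : Int) 1)
    (transposeN board ((n : Nat) : Int))
    (fun j hj => ⟨(PySem.List.mem_pyRange_one.mp hj).1,
      by have := (PySem.List.mem_pyRange_one.mp hj).2; have := (PySem.List.mem_pyRange_one.mp hj).1; omega⟩)
    (PySem.List.nodup_pyRange_one _ _) (shape_transposeN n board)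
  rw [transposeN_eq_map_colTake]
  apply List.map_congr_left
  intro i hi
  obtain ⟨hi0, hilt⟩ := PySem.List.mem_pyRange_one.mp hi
  rw [hcols i hi0 (by omega), if_pos hi]
  rw [colTake_transposeN n board i hi0 (by omega) hsh.1 (hsh.2 i.toNat (by omega))]
  rw [PySem.List.slice_to _ (by omega)]
  simp

-- ===== VERDICT (by name: the statement is the Claim_ definition above) =====
theorem play_move1_spec : Claim_equal_play_move1 := by
  unfold Claim_equal_play_move1
  intro move board size _hdom hpre
  unfold Spec_play_move1
  unfold Pre_play_move1 at hpre
  unfold play_move1 play_move1_alt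
  by_cases hl : move = "left"
  · subst hl
    rw [if_pos rfl, if_pos rfl]
    by_cases hsz : size ≤ 0
    · simp only [transposeN]
      rw [PySem.List.pyRange_one_eq_nil (by omega)]
      rfl
    · have hshape := (hpre (Or.inl rfl)).resolve_left hsz
      have hn : size = ((size.toNat : Nat) : Int) := by omega
      rw [hn]
      exact left_eq size.toNat board ⟨hshape.1, hshape.2⟩
  · by_cases hr : move = "right"
    · subst hr
      rw [if_neg hl, if_neg hl, if_pos rfl, if_pos rfl]
      by_cases hsz : size ≤ 0
      · simp only [transposeN]
        rw [PySem.List.pyRange_one_eq_nil (by omega)]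
        rfl
      · have hshape := (hpre (Or.inr (Or.inl rfl))).resolve_left hsz
        have hn : size = ((size.toNat : Nat) : Int) := by omega
        rw [hn]
        exact right_eq size.toNat board ⟨hshape.1, hshape.2⟩
    · by_cases hd : move = "down"
      · subst hd
        rw [if_neg hl, if_neg hl, if_neg hr, if_neg hr, if_pos rfl,
            if_pos (Or.inr rfl)]
        rw [show (("down" : String) == "up") = false from rfl]
        by_cases hsz : size ≤ 0
        · rw [PySem.List.pyRange_one_eq_nil (by omega)]
          rfl
        · have hshape := (hpre (Or.inr (Or.inr (Or.inr rfl)))).resolve_left hsz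
          have hn : size = ((size.toNat : Nat) : Int) := by omega
          rw [hn]
          rw [foldA_down size.toNat board ⟨hshape.1, hshape.2⟩]
          exact (foldB size.toNat false board ⟨hshape.1, hshape.2⟩).symm
      · by_cases hu : move = "up"
        · subst hu
          rw [if_neg hl, if_neg hl, if_neg hr, if_neg hr, if_neg hd,
              if_pos rfl, if_pos (Or.inl rfl)]
          rw [show (("up" : String) == "up") = true from rfl]
          by_cases hsz : size ≤ 0
          · rw [PySem.List.pyRange_one_eq_nil (by omega)]
            rfl
          · have hshape := (hpre (Or.inr (Or.inr (Or.inl rfl)))).resolve_left hsz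
            have hn : size = ((size.toNat : Nat) : Int) := by omega
            rw [hn]
            rw [foldA_up size.toNat board ⟨hshape.1, hshape.2⟩]
            exact (foldB size.toNat true board ⟨hshape.1, hshape.2⟩).symm
        · rw [if_neg hl, if_neg hl, if_neg hr, if_neg hr, if_neg hd, if_neg hu,
              if_neg (fun h => h.elim hu hd)]
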